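-- pv_equiv track=rewrite | github.com/kids-first/kf-somatic-workflow | scripts/consensus_merge.py | get_gt_consensus
-- ===== SOURCE A (Python) =====
-- from collections import Counter
--
-- def get_gt_consensus(gt_list):
--     """ Determine level of genotype consensus from single-caller genotypes
--         Args:
--             gt_list (list): Strings in '0/0' format representing
--                 single-caller genotypes
--
--         Returns: tuple of (consensus genotype, consensus tag)
--             consensus genotype will be '0/1' in event of tie
--             consensus tag may be 'unanimous', 'majority', 'deadlock'
--     """
--     conflict_gt_tag = '0/1'
--     unan_tag, majo_tag, tie_tag = 'unanimous', 'majority', 'deadlock'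
--
--     counts = Counter(gt_list)
--
--     if '.' in counts:
--         counts.pop('.')
--
--     if len(counts) == 1:
--         return list(counts)[0], unan_tag
--
--     largest_count = max(counts.values())
--     has_max_count = {k: v for k, v in counts.items() if v == largest_count}
--     if len(has_max_count) == 1:
--         return list(has_max_count)[0], majo_tag
--     else:
--         return conflict_gt_tag, tie_tag
-- ===== SOURCE B (Python) =====
-- from collections import Counter
--
-- def get_gt_consensus(gt_list):
--     """Consensus genotype/tag via a count-ordered ranking of the calls."""
--     ranked = Counter(g for g in gt_list if g != '.').most_common()
--     if not ranked:
--         raise ValueError('no genotype calls')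
--     if len(ranked) == 1:
--         return ranked[0][0], 'unanimous'
--     if ranked[0][1] == ranked[1][1]:
--         return '0/1', 'deadlock'
--     return ranked[0][0], 'majority'
-- ===== Notes on version B (the rewrite author's own statement) =====
-- stated objective: simpler
-- what changed: B filters out '.' up front, ranks the counts once with most_common(), and decides by comparing the top two entries, replacing A's dict-pop of '.', max-of-values and filter-dict scan; both raise ValueError when no real calls exist (excluded by Pre_).
import Mathlib
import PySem

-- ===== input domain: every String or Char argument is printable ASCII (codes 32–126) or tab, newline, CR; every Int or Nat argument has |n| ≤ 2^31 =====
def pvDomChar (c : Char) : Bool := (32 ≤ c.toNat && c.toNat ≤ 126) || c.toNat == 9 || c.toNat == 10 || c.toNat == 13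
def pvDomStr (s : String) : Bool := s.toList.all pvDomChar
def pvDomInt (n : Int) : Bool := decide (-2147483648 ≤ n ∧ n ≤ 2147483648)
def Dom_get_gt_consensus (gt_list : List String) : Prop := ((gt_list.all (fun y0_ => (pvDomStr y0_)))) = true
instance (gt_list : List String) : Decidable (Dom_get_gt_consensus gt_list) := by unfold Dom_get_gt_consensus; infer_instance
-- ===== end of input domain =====

-- B replaces A's dict-pop of '.', max-of-values and filter-dict scan by one count-ordered
-- ranking (most_common) and a top-two comparison: simpler decomposition, same cost.

-- ===== PORT A =====
def get_gt_consensus (gt_list : List String) : String × String :=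
  let conflict_gt_tag := "0/1"
  let counts := PySem.Dict.counter gt_list
  -- counts.pop('.') with its return value discarded is Dict.erase
  let counts := if counts.contains "." then counts.erase "." else counts
  if counts.size = 1 then
    (counts.keys.headD "", "unanimous")  -- list(counts)[0]; the guard makes index 0 in range
  else
    match PySem.List.max? counts.values (fun v => v) with
    | none => ("", "")  -- max() of an empty sequence: Python raises ValueError; excluded by Pre_
    | some largest =>
      let has_max := PySem.Dict.mk (counts.items.filter (fun p => p.2 == largest))
      if has_max.size = 1 then (has_max.keys.headD "", "majority")
      else (conflict_gt_tag, "deadlock")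

-- ===== PORT B =====
def get_gt_consensus_alt (gt_list : List String) : String × String :=
  let ranked := PySem.List.sorted
      (PySem.Dict.counter (gt_list.filter (fun g => g != "."))).items (fun p => p.2) true
  match ranked with
  | [] => ("", "")  -- B raises ValueError here; excluded by Pre_
  | [p] => (p.1, "unanimous")
  | p :: q :: _ => if p.2 == q.2 then ("0/1", "deadlock") else (p.1, "majority")

-- ===== PRECONDITION & SPEC =====
-- Pre_ excludes exactly the inputs (empty list, or every element '.') on which A's
-- max() of an empty sequence raises ValueError (B raises ValueError there too).
def Pre_get_gt_consensus (gt_list : List String) : Prop :=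
  gt_list.filter (fun g => g != ".") ≠ []
instance (gt_list : List String) : Decidable (Pre_get_gt_consensus gt_list) := by
  unfold Pre_get_gt_consensus; infer_instance
def pvWitness_get_gt_consensus : List String := ["0/1", "0/0", "0/1"]
def Spec_get_gt_consensus (gt_list : List String) (out : String × String) : Prop := out = get_gt_consensus_alt gt_list
instance (gt_list : List String) (out : String × String) : Decidable (Spec_get_gt_consensus gt_list out) := by unfold Spec_get_gt_consensus; infer_instance

-- ===== CLAIM (what is proved, stated in full; the proofs are below) =====
def Claim_equal_get_gt_consensus : Prop := ∀ (gt_list : List String), Dom_get_gt_consensus gt_list → Pre_get_gt_consensus gt_list → Spec_get_gt_consensus gt_list (get_gt_consensus gt_list)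

-- ===== LEMMAS AND PROOFS =====

-- set(xs.filter p) = (set(xs)).filter p : first-occurrence order survives filtering
theorem pv_add_filter {α : Type} [BEq α] [LawfulBEq α] (p : α → Bool) (s : List α) (x : α) :
    (PySem.Set.add s x).filter p =
      if p x then PySem.Set.add (s.filter p) x else s.filter p := by
  by_cases hc : x ∈ s
  · by_cases hp : p x = true
    · have hf : x ∈ s.filter p := List.mem_filter.mpr ⟨hc, hp⟩
      simp [PySem.Set.add, PySem.Set.contains, hc, hp, hf]
    · simp [PySem.Set.add, PySem.Set.contains, hc, hp]
  · by_cases hp : p x = true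
    · have hf : x ∉ s.filter p := fun h => hc (List.mem_filter.mp h).1
      simp [PySem.Set.add, PySem.Set.contains, hc, hp, hf, List.filter_append]
    · simp [PySem.Set.add, PySem.Set.contains, hc, hp, List.filter_append]

theorem pv_ofList_filter {α : Type} [BEq α] [LawfulBEq α] (p : α → Bool) (xs : List α) :
    PySem.Set.ofList (xs.filter p) = (PySem.Set.ofList xs).filter p := by
  have aux : ∀ (ys : List α) (s : List α),
      (ys.foldl PySem.Set.add s).filter p = (ys.filter p).foldl PySem.Set.add (s.filter p) := by
    intro ys
    induction ys with
    | nil => intro s; simp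
    | cons y t ih =>
      intro s
      by_cases hp : p y = true
      · simp only [List.foldl_cons, List.filter_cons, hp, if_pos]
        rw [ih, pv_add_filter, if_pos hp]
      · simp only [List.foldl_cons, List.filter_cons, hp]
        rw [ih, pv_add_filter, if_neg (by simp [hp])]
        simp
  simpa [PySem.Set.ofList_eq_foldl] using (aux xs []).symm

-- A's counts after popping '.' equal B's counter of the filtered list
theorem pv_counts_eq (xs : List String) :
    (if (PySem.Dict.counter xs).contains "." then
        (PySem.Dict.counter xs).erase "." else PySem.Dict.counter xs) =
      PySem.Dict.counter (xs.filter (fun g => g != ".")) := by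
  by_cases hc : (PySem.Dict.counter xs : PySem.Dict String Int).contains "." = true
  · rw [if_pos hc]
    apply PySem.Dict.ext
    show (PySem.Dict.counter xs).items.filter (fun p => !p.1 == ".") = _
    rw [PySem.Dict.items_counter, PySem.Dict.items_counter, pv_ofList_filter]
    rw [List.filter_map]
    apply List.map_congr_left
    intro a ha
    have ha2 : (a != ".") = true := (List.mem_filter.mp ha).2
    have : a ≠ "." := by simpa using ha2
    rw [List.count_filter (p := fun g => g != ".") ha2]
  · rw [if_neg hc]
    have hd : "." ∉ xs := by
      rw [PySem.Dict.contains_counter] at hc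
      simpa using hc
    have : xs.filter (fun g => g != ".") = xs := by
      apply List.filter_eq_self.mpr
      intro a ha
      simp only [bne_iff_ne]
      exact fun h => hd (h ▸ ha)
    rw [this]

-- the decision core, over an arbitrary nonempty items list
theorem pv_core (l : List (String × Int)) (hne : l ≠ []) :
    (if l.length = 1 then ((l.map Prod.fst).headD "", "unanimous")
     else match PySem.List.max? (l.map Prod.snd) (fun v => v) with
       | none => (("" : String), ("" : String))
       | some m =>
         if (l.filter (fun p => p.2 == m)).length = 1 then
           (((l.filter (fun p => p.2 == m)).map Prod.fst).headD "", "majority")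
         else ("0/1", "deadlock"))
    = match PySem.List.sorted l (fun p => p.2) true with
      | [] => ("", "")
      | [p] => (p.1, "unanimous")
      | p :: q :: _ => if p.2 == q.2 then ("0/1", "deadlock") else (p.1, "majority") := by
  rcases hr : PySem.List.sorted l (fun p => p.2) true with _ | ⟨p, _ | ⟨q, rest⟩⟩
  · exact absurd ((PySem.List.sorted_eq_nil_iff l _ true).mp hr) hne
  · have hperm := PySem.List.sorted_perm l (fun p : String × Int => p.2) true
    rw [hr] at hperm
    have hl : l = [p] := List.perm_singleton.mp hperm.symm
    subst hl
    simp
  · have hperm := PySem.List.sorted_perm l (fun p : String × Int => p.2) true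
    rw [hr] at hperm
    have hlen : l.length = rest.length + 2 := by simpa using hperm.length_eq.symm
    rw [if_neg (by omega)]
    have hpl : p ∈ l := hperm.mem_iff.mp (by simp)
    have hql : q ∈ l := hperm.mem_iff.mp (by simp)
    cases hm : PySem.List.max? (l.map Prod.snd) (fun v => v) with
    | none =>
      have : l.map Prod.snd = [] := (PySem.List.max?_eq_none_iff _ _).mp hm
      simp [List.map_eq_nil_iff.mp this] at hlen
    | some m =>
      have hple : ∀ y ∈ l, y.2 ≤ p.2 := PySem.List.key_head_sorted_rev_ge l _ hr
      have hmp : m = p.2 := by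
        rcases List.mem_map.mp (PySem.List.max?_mem hm) with ⟨z, hz, rfl⟩
        exact le_antisymm (hple z hz)
          (PySem.List.max?_isMax hm _ (List.mem_map_of_mem hpl))
      subst hmp
      have hpair := PySem.List.sorted_pairwise_rev l (fun p : String × Int => p.2)
      rw [hr] at hpair
      have hqp : q.2 ≤ p.2 := (List.pairwise_cons.mp hpair).1 q (by simp)
      have hrest : ∀ z ∈ rest, z.2 ≤ q.2 :=
        (List.pairwise_cons.mp (List.pairwise_cons.mp hpair).2).1
      have hcount : (l.filter (fun z => z.2 == p.2)).length
          = (p :: q :: rest).countP (fun z => z.2 == p.2) := by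
        rw [← List.countP_eq_length_filter]
        exact (hperm.countP_eq _).symm
      by_cases hq : q.2 = p.2
      · have h2 : (l.filter (fun z => z.2 == p.2)).length ≠ 1 := by
          rw [hcount]
          simp [hq]
        simp [h2, hq]
      · have hrest' : ∀ z ∈ rest, ¬(z.2 == p.2) = true := by
          intro z hz h
          have h' : z.2 = p.2 := by simpa using h
          have hzq := hrest z hz
          have hlt : q.2 < p.2 := lt_of_le_of_ne hqp hq
          omega
        have h1 : (l.filter (fun z => z.2 == p.2)).length = 1 := by
          rw [hcount]
          simp only [List.countP_cons]
          rw [List.countP_eq_zero.mpr hrest']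
          simp [hq]
        have hpf : p ∈ l.filter (fun z => z.2 == p.2) :=
          List.mem_filter.mpr ⟨hpl, by simp⟩
        rcases List.length_eq_one_iff.mp h1 with ⟨a, hal⟩
        have hap : a = p := by
          have hx := hpf
          rw [hal] at hx
          have hpa : p = a := by simpa using hx
          exact hpa.symm
        have hne' : (p.2 == q.2) = false := by
          simp only [beq_eq_false_iff_ne, ne_eq]
          exact fun h => hq h.symm
        simp [hal, hap, hne']

-- ===== VERDICT (by name: the statement is the Claim_ definition above) =====
theorem get_gt_consensus_spec : Claim_equal_get_gt_consensus := by
  intro xs _ hpre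
  show get_gt_consensus xs = get_gt_consensus_alt xs
  have hl : (PySem.Dict.counter (xs.filter (fun g => g != "."))).items ≠ [] := by
    rw [PySem.Dict.items_counter]
    intro h
    rcases List.exists_mem_of_ne_nil _ hpre with ⟨x, hx⟩
    have : x ∈ PySem.Set.ofList (xs.filter (fun g => g != ".")) :=
      (PySem.Set.mem_ofList _ _).mpr hx
    simp [List.map_eq_nil_iff.mp h] at this
  simp only [get_gt_consensus, get_gt_consensus_alt, pv_counts_eq]
  exact pv_core _ hl
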